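-- pv_equiv track=rewrite | github.com/JanekKwadrat/szkopul_itp | olimpiada_informatyczna/pisarze/pre.py | fetch_freqs
-- ===== SOURCE A (Python) =====
-- def fetch_freqs(book: str):
--     words = book.split()
--     words = [s[0:4] for s in words if len(s) >= 4]
--     total = len(words)
--     freqs = dict()
--     for s in words:
--         if s in freqs: freqs[s] += 1
--         else: freqs[s] = 1
--     for s in freqs:
--         freqs[s] =  freqs[s] * 1000000 // total
--     return freqs
-- ===== SOURCE B (Python) =====
-- def fetch_freqs(book: str):
--     prefixes = [w[:4] for w in book.split() if len(w) >= 4]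
--     total = len(prefixes)
--     freqs = {}
--     while prefixes:
--         p = prefixes[0]
--         rest = [x for x in prefixes if x != p]
--         freqs[p] = (len(prefixes) - len(rest)) * 1000000 // total
--         prefixes = rest
--     return freqs
-- ===== Notes on version B (the rewrite author's own statement) =====
-- stated objective: alternative
-- what changed: Replaces A's hash-counting pass plus in-place normalization pass with a worklist partition: repeatedly take the first remaining prefix, filter all its occurrences out of the shrinking worklist, and emit its scaled frequency directly from the length drop, so no counting dictionary and no per-key normalization loop exist.
import Mathlib
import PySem

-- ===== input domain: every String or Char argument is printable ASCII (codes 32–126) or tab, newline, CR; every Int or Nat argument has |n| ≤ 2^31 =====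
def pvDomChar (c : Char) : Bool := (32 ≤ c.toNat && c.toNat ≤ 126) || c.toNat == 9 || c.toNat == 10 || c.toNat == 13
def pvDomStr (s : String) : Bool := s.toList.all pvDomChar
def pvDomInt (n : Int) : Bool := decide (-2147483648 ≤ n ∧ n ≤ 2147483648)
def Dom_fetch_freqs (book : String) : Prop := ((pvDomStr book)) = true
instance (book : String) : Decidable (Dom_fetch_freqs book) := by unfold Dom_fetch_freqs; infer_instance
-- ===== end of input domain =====

-- B replaces A's dict-counting + normalization passes with a worklist partition (take first prefix, filter its occurrences out, emit its scaled frequency); same values, different algorithm.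

-- ===== PORT A =====
def fetch_freqs (book : String) : List (String × Int) :=
  let words := PySem.Str.split₀ book
  let words := (words.filter (fun s => 4 ≤ PySem.Str.len s)).map
      (fun s => PySem.Str.slice s (some 0) (some 4))
  let total : Int := words.length
  let freqs := words.foldl
      (fun d s => if d.contains s then d.insert s (d.getD s 0 + 1) else d.insert s 1)
      PySem.Dict.empty
  let freqs := freqs.keys.foldl
      (fun d s => d.insert s (PySem.Int.floordiv (d.getD s 0 * 1000000) total)) freqs
  freqs.items

-- ===== PORT B =====
-- the while loop of Source B: worklist of remaining prefixes; dict insertions become list appends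
-- (each key is removed from the worklist when emitted, so keys never repeat)
def pvGo (total : Int) : List String → List (String × Int)
  | [] => []
  | p :: t =>
    let rest := (p :: t).filter (fun x => decide (x ≠ p))
    (p, PySem.Int.floordiv ((((p :: t).length : Int) - (rest.length : Int)) * 1000000) total)
      :: pvGo total rest
  termination_by xs => xs.length
  decreasing_by
    simp only [List.filter_cons, decide_not, ne_eq, List.length_cons]
    exact Nat.lt_succ_of_le (List.length_filter_le _ _)

def fetch_freqs_alt (book : String) : List (String × Int) :=
  let prefixes := ((PySem.Str.split₀ book).filter (fun w => 4 ≤ PySem.Str.len w)).map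
      (fun w => PySem.Str.slice w (some 0) (some 4))
  let total : Int := prefixes.length
  pvGo total prefixes

-- ===== PRECONDITION & SPEC =====
def Spec_fetch_freqs (book : String) (out : List (String × Int)) : Prop := out = fetch_freqs_alt book
instance (book : String) (out : List (String × Int)) : Decidable (Spec_fetch_freqs book out) := by unfold Spec_fetch_freqs; infer_instance

-- ===== CLAIM (what is proved, stated in full; the proofs are below) =====
def Claim_equal_fetch_freqs : Prop := ∀ (book : String), Dom_fetch_freqs book → Spec_fetch_freqs book (fetch_freqs book)

-- ===== LEMMAS AND PROOFS =====

-- A's counting loop builds exactly Counter(words)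
theorem count_loop_eq_counter (xs : List String) :
    xs.foldl (fun d s => if d.contains s then d.insert s (d.getD s 0 + 1) else d.insert s 1)
      PySem.Dict.empty = PySem.Dict.counter xs := by
  have hstep : (fun (d : PySem.Dict String Int) s =>
      if d.contains s then d.insert s (d.getD s 0 + 1) else d.insert s 1)
      = fun d s => d.insert s (d.getD s 0 + 1) := by
    funext d s
    by_cases h : d.contains s = true
    · simp [h]
    · have h' : d.contains s = false := by simpa using h
      simp [h', PySem.Dict.getD_of_not_contains d 0 h']
  rw [hstep, PySem.Dict.foldl_insert_getD_add_one_eq_counter]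

-- the normalization loop only changes the value at the keys it visits
theorem fold_insert_getD (f : Int → Int) (ks : List String) (d : PySem.Dict String Int)
    (hnd : ks.Nodup) (k : String) :
    (ks.foldl (fun d s => d.insert s (f (d.getD s 0))) d).getD k 0
      = if k ∈ ks then f (d.getD k 0) else d.getD k 0 := by
  induction ks generalizing d with
  | nil => simp
  | cons a t ih =>
    simp only [List.foldl_cons]
    rw [ih _ hnd.of_cons]
    by_cases hk : k ∈ t
    · have hka : k ≠ a := by rintro rfl; exact (List.nodup_cons.mp hnd).1 hk
      simp [hk, hka, PySem.Dict.getD_insert]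
    · by_cases hka : k = a
      · subst hka
        simp [hk, PySem.Dict.getD_insert_self]
      · simp [hk, hka, PySem.Dict.getD_insert]

theorem set_update_self (s : List String) (l : List String) (h : ∀ x ∈ l, x ∈ s) :
    PySem.Set.update s l = s := by
  induction l generalizing s with
  | nil => simp [PySem.Set.update]
  | cons a t ih =>
    have ha : PySem.Set.add s a = s := by
      simp [PySem.Set.add, PySem.Set.contains, h a (by simp)]
    calc PySem.Set.update s (a :: t) = PySem.Set.update (PySem.Set.add s a) t := rfl
      _ = PySem.Set.update s t := by rw [ha]
      _ = s := ih s (fun x hx => h x (by simp [hx]))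

theorem normalize_items (xs : List String) (f : Int → Int) :
    ((PySem.Dict.counter xs).keys.foldl
        (fun d s => d.insert s (f (d.getD s 0))) (PySem.Dict.counter xs)).items
      = (PySem.List.dedup xs).map (fun k => (k, f ((xs.count k : Int)))) := by
  set c := PySem.Dict.counter (κ := String) xs with hc
  set F := c.keys.foldl (fun d s => d.insert s (f (d.getD s 0))) c with hF
  have hkeys : F.keys = c.keys := by
    rw [hF, PySem.Dict.keys_foldl_insert]
    exact set_update_self _ _ (fun x hx => hx)
  have hnodc : c.keys.Nodup := PySem.Dict.nodup_keys_counter xs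
  have hnod : F.keys.Nodup := hkeys ▸ hnodc
  rw [PySem.Dict.items_eq_map_keys F hnod 0, hkeys]
  have hget : ∀ k ∈ c.keys, F.getD k 0 = f ((xs.count k : Int)) := by
    intro k hk
    rw [hF, fold_insert_getD f c.keys c hnodc k, if_pos hk, hc, PySem.Dict.getD_counter]
  have hmap : c.keys.map (fun k => (k, F.getD k 0))
      = c.keys.map (fun k => (k, f ((xs.count k : Int)))) := by
    apply List.map_congr_left
    intro k hk
    rw [hget k hk]
  rw [hmap, hc, PySem.Dict.keys_counter]
  simp

-- A's items equal the dedup-ordered map of scaled counts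
theorem a_side_eq (xs : List String) :
    ((xs.foldl (fun d s => if d.contains s then d.insert s (d.getD s 0 + 1) else d.insert s 1)
        (PySem.Dict.empty : PySem.Dict String Int)).keys.foldl
      (fun d s => d.insert s (PySem.Int.floordiv (d.getD s 0 * 1000000) (xs.length : Int)))
      (xs.foldl (fun d s => if d.contains s then d.insert s (d.getD s 0 + 1) else d.insert s 1)
        PySem.Dict.empty)).items
    = (PySem.List.dedup xs).map
        (fun p => (p, PySem.Int.floordiv ((xs.count p : Int) * 1000000) (xs.length : Int))) := by
  simp only [count_loop_eq_counter]
  exact normalize_items xs (fun v => PySem.Int.floordiv (v * 1000000) (xs.length : Int))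

-- filter commutes with first-occurrence dedup
theorem ofList_filter (q : String → Bool) (t : List String) :
    PySem.Set.ofList (t.filter q) = (PySem.Set.ofList t).filter q := by
  induction t with
  | nil => simp [PySem.Set.ofList_nil]
  | cons a t ih =>
    by_cases hq : q a = true
    · simp only [List.filter_cons, hq, if_true, PySem.Set.ofList_cons, ih, PySem.Set.discard,
        List.filter_filter]
      refine congrArg (a :: ·) ?_
      apply List.filter_congr
      intro x _
      exact Bool.and_comm _ _
    · have hq' : q a = false := by simpa using hq
      simp only [List.filter_cons, hq', PySem.Set.ofList_cons, ih, PySem.Set.discard,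
        List.filter_filter, Bool.false_eq_true, if_false]
      symm
      apply List.filter_congr
      intro x _
      by_cases hqx : q x = true
      · have : x ≠ a := by rintro rfl; rw [hqx] at hq'; cases hq'
        simp [hqx, this]
      · simp [Bool.eq_false_iff.mpr hqx]

theorem dedup_cons_filter (p : String) (t : List String) :
    PySem.List.dedup (p :: t) = p :: PySem.List.dedup (t.filter (fun x => decide (x ≠ p))) := by
  show PySem.Set.ofList (p :: t) = p :: PySem.Set.ofList (t.filter (fun x => decide (x ≠ p)))
  rw [PySem.Set.ofList_cons, ofList_filter]
  refine congrArg (p :: ·) ?_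
  show (PySem.Set.ofList t).discard p = _
  unfold PySem.Set.discard
  apply List.filter_congr
  intro x _
  simp only [decide_not]
  exact congrArg Bool.not (Bool.coe_iff_coe.mp (by simp))

theorem go_eq (total : Int) (xs : List String) :
    pvGo total xs
      = (PySem.List.dedup xs).map
          (fun p => (p, PySem.Int.floordiv ((xs.count p : Int) * 1000000) total)) := by
  induction hn : xs.length using Nat.strong_induction_on generalizing xs with
  | _ n ih =>
  match xs, hn with
  | [], _ => simp [pvGo, PySem.List.dedup, PySem.Set.ofList_nil]
  | p :: t, hn =>
    rw [pvGo]
    have hrest : (p :: t).filter (fun x => decide (x ≠ p)) = t.filter (fun x => decide (x ≠ p)) := by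
      simp
    set rest := t.filter (fun x => decide (x ≠ p)) with hrestdef
    rw [hrest]
    have hlt : rest.length < n := by
      rw [← hn]
      exact Nat.lt_succ_of_le (List.length_filter_le _ _)
    rw [ih rest.length hlt rest rfl]
    rw [dedup_cons_filter, List.map_cons]
    rw [List.cons_eq_cons]
    constructor
    · -- head entry
      rw [Prod.mk.injEq]
      refine ⟨rfl, ?_⟩
      refine congrArg (fun z => PySem.Int.floordiv (z * 1000000) total) ?_
      have hc : (p :: t).count p + rest.length = (p :: t).length := by
        have h1 := List.length_eq_countP_add_countP (fun x => x == p) (l := p :: t)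
        have h2 : List.countP (fun x => x == p) (p :: t) = (p :: t).count p := rfl
        have h3 : List.countP (fun a => decide ¬(a == p) = true) (p :: t)
            = rest.length := by
          rw [← hrest, ← List.countP_eq_length_filter]
          apply List.countP_congr
          intro x _
          simp
        omega
      omega
    · -- tail entries
      apply List.map_congr_left
      intro q hq
      have hq' : q ∈ rest := by
        have := (PySem.List.mem_dedup rest q).mp hq
        exact this
      have hqp : q ≠ p := by
        have := (List.mem_filter.mp hq').2
        simpa using this
      have : rest.count q = (p :: t).count q := by
        rw [hrestdef, List.count_filter (by simpa using hqp), List.count_cons_of_ne (by exact fun h => hqp h.symm)]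
      rw [this]

-- ===== VERDICT (by name: the statement is the Claim_ definition above) =====
theorem fetch_freqs_spec : Claim_equal_fetch_freqs := by
  intro book _
  show fetch_freqs book = fetch_freqs_alt book
  unfold fetch_freqs fetch_freqs_alt
  rw [a_side_eq, go_eq]
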